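-- pv_equiv track=rewrite | github.com/fomn16/GAN_Data_Augmentation_Evaluation_Methodology | ResultCompilers/FinalOutput/compiler.py | orderNames
-- ===== SOURCE A (Python) =====
-- def orderNames(names):
--     out = [None, None, None, None]
--     for name in names:
--         if(name.startswith('GAN')): out[0] = name
--         if(name.startswith('CGAN')): out[1] = name
--         if(name.startswith('WCGAN')): out[2] = name
--         if(name.startswith('WUNET')): out[3] = name
--     return out
-- ===== SOURCE B (Python) =====
-- def orderNames(names):
--     lst = list(names)
--     prefixes = ('GAN', 'CGAN', 'WCGAN', 'WUNET')
--     return [next((n for n in reversed(lst) if n.startswith(p)), None)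
--             for p in prefixes]
-- ===== Notes on version B (the rewrite author's own statement) =====
-- stated objective: alternative
-- what changed: Replaces A's single pass that destructively overwrites four slots with a comprehension over the four prefixes, each slot taken as the last matching name via a reversed scan.
import Mathlib
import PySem

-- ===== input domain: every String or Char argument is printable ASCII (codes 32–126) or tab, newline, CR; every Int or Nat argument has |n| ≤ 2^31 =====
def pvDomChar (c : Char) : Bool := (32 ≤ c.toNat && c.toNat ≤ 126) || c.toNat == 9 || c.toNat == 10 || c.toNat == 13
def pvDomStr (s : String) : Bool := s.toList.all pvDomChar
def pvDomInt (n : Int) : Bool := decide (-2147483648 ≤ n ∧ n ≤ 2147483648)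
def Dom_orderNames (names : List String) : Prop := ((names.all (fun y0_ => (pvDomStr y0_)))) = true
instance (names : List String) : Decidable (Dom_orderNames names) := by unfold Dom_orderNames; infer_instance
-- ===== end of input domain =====

-- B replaces A's single pass overwriting four slots by a per-prefix reversed scan (last match); objective: alternative decomposition.

-- ===== PORT A =====
-- one pass over names, overwriting each slot on every matching name
def orderNames (names : List String) : List (Option String) :=
  names.foldl
    (fun out name =>
      let out := if PySem.Str.startswith name "GAN"   then out.set 0 (some name) else out
      let out := if PySem.Str.startswith name "CGAN"  then out.set 1 (some name) else out
      let out := if PySem.Str.startswith name "WCGAN" then out.set 2 (some name) else out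
      if PySem.Str.startswith name "WUNET" then out.set 3 (some name) else out)
    [none, none, none, none]

-- ===== PORT B =====
-- next((n for n in reversed(lst) if n.startswith(p)), None)
def lastMatch (names : List String) (p : String) : Option String :=
  names.reverse.find? (fun n => PySem.Str.startswith n p)

def orderNames_alt (names : List String) : List (Option String) :=
  ["GAN", "CGAN", "WCGAN", "WUNET"].map (fun p => lastMatch names p)

-- ===== PRECONDITION & SPEC =====
def Spec_orderNames (names : List String) (out : List (Option String)) : Prop := out = orderNames_alt names
instance (names : List String) (out : List (Option String)) : Decidable (Spec_orderNames names out) := by unfold Spec_orderNames; infer_instance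

-- ===== CLAIM (what is proved, stated in full; the proofs are below) =====
def Claim_equal_orderNames : Prop := ∀ (names : List String), Dom_orderNames names → Spec_orderNames names (orderNames names)

-- ===== LEMMAS AND PROOFS =====

-- slot value as "last match or else the initial slot content"
def slot (names : List String) (p : String) (init : Option String) : Option String :=
  match lastMatch names p with
  | some n => some n
  | none => init

-- the loop body of A's fold, named for the proofs
def stepA (out : List (Option String)) (name : String) : List (Option String) :=
  let out := if PySem.Str.startswith name "GAN"   then out.set 0 (some name) else out
  let out := if PySem.Str.startswith name "CGAN"  then out.set 1 (some name) else out
  let out := if PySem.Str.startswith name "WCGAN" then out.set 2 (some name) else out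
  if PySem.Str.startswith name "WUNET" then out.set 3 (some name) else out

theorem orderNames_eq_foldl (names : List String) :
    orderNames names = names.foldl stepA [none, none, none, none] := rfl

theorem slot_cons (n : String) (ns : List String) (p : String) (init : Option String) :
    slot (n :: ns) p init = slot ns p (if PySem.Str.startswith n p then some n else init) := by
  simp only [slot, lastMatch, List.reverse_cons, List.find?_append]
  cases h : ns.reverse.find? (fun m => PySem.Str.startswith m p) <;>
    by_cases hp : PySem.Chars.startswith n.toList p.toList = true <;>
      simp [h, hp, List.find?, Option.or, PySem.Str.startswith]

theorem slot_none (ns : List String) (p : String) : slot ns p none = lastMatch ns p := by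
  unfold slot; cases h : lastMatch ns p <;> simp

theorem stepA_eval (n : String) (a b c d : Option String) :
    stepA [a, b, c, d] n
    = [if PySem.Str.startswith n "GAN" then some n else a,
       if PySem.Str.startswith n "CGAN" then some n else b,
       if PySem.Str.startswith n "WCGAN" then some n else c,
       if PySem.Str.startswith n "WUNET" then some n else d] := by
  unfold stepA
  split_ifs <;> rfl

theorem foldl_slots (ns : List String) (a b c d : Option String) :
    ns.foldl stepA [a, b, c, d]
    = [slot ns "GAN" a, slot ns "CGAN" b, slot ns "WCGAN" c, slot ns "WUNET" d] := by
  induction ns generalizing a b c d with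
  | nil => simp [slot, lastMatch, List.find?]
  | cons n ns ih =>
    rw [List.foldl_cons, stepA_eval, ih, slot_cons, slot_cons, slot_cons, slot_cons]

-- ===== VERDICT (by name: the statement is the Claim_ definition above) =====
theorem orderNames_spec : Claim_equal_orderNames := by
  intro names _
  show orderNames names = orderNames_alt names
  rw [orderNames_eq_foldl, foldl_slots, slot_none, slot_none, slot_none, slot_none]
  rfl
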